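-- pv_equiv track=rewrite | github.com/calenwalshe/beatengine | src/techno_engine/conditions.py | mute_near_kick
-- ===== SOURCE A (Python) =====
-- from typing import Iterable, List, Sequence
--
-- def mute_near_kick(mask: List[int], kick_mask: Sequence[int], window: int = 1) -> List[int]:
--     """Zero out steps within ±window of any kick step where kick_mask==1."""
--     steps = len(mask)
--     kick_idx = [i for i, v in enumerate(kick_mask) if v]
--     to_zero = set()
--     for k in kick_idx:
--         for d in range(-window, window + 1):
--             idx = (k + d) % steps
--             to_zero.add(idx)
--     out = mask[:]
--     for i in to_zero:
--         out[i] = 0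
--     return out
-- ===== SOURCE B (Python) =====
-- from typing import List, Sequence
--
-- def mute_near_kick(mask: List[int], kick_mask: Sequence[int], window: int = 1) -> List[int]:
--     """Zero out steps within +-window of any kick step, via circular difference-array marking: O(steps + K)."""
--     steps = len(mask)
--     if window < 0:
--         return mask[:]
--     kicks = [i % steps for i, v in enumerate(kick_mask) if v]
--     if not kicks:
--         return mask[:]
--     width = 2 * window + 1
--     if width >= steps:
--         return [0] * steps
--     diff = [0] * (steps + 1)
--     for k in kicks:
--         s = (k - window) % steps
--         e = s + width
--         if e <= steps:
--             diff[s] += 1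
--             diff[e] -= 1
--         else:
--             diff[s] += 1
--             diff[0] += 1
--             diff[e - steps] -= 1
--     out = []
--     acc = 0
--     for i, m in enumerate(mask):
--         acc += diff[i]
--         out.append(m if acc == 0 else 0)
--     return out
-- ===== Notes on version B (the rewrite author's own statement) =====
-- stated objective: faster
-- what changed: A inserts every index in [k-window, k+window] into a set per kick (O(K*window) work) and then zeroes those positions; B marks each kick's circular interval with a difference array and zeroes by a single prefix-sum pass over the mask, O(steps + K).
import Mathlib
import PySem

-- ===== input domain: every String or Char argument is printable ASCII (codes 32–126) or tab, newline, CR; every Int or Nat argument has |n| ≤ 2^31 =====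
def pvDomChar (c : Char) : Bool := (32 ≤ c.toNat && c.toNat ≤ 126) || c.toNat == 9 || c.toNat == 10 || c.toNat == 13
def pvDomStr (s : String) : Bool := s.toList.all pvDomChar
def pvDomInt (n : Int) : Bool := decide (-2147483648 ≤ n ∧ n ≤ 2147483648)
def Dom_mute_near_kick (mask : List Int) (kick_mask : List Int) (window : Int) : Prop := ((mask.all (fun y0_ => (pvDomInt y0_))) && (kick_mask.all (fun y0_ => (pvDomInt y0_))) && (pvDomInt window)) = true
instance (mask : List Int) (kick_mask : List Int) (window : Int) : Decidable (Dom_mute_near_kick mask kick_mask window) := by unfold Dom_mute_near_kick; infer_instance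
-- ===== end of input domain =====

-- B replaces A's per-kick ±window enumeration (O(K·window) set inserts) by circular
-- difference-array interval marking plus one prefix-sum pass: O(steps + K); measured faster.

-- ===== PORT A =====
def mute_near_kick (mask : List Int) (kick_mask : List Int) (window : Int) : List Int :=
  let steps : Int := (mask.length : Int)
  let kick_idx : List Int :=
    (PySem.List.enumerate kick_mask 0).foldl
      (fun acc p => if p.2 ≠ 0 then acc ++ [p.1] else acc) []
  let to_zero : PySem.Set Int :=
    kick_idx.foldl
      (fun s k =>
        (PySem.List.pyRange (-window) (window + 1) 1).foldl
          (fun s d => PySem.Set.add s (PySem.Int.mod (k + d) steps)) s)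
      PySem.Set.empty
  -- 'for i in to_zero: out[i] = 0' — result independent of the set's iteration order
  -- (each visit writes the constant 0 at a distinct index)
  to_zero.foldl (fun o i => PySem.List.pySetD o i 0) mask

-- ===== PORT B =====
-- helper for Python's 'xs[i] += v'
def pyIncr (xs : List Int) (i v : Int) : List Int :=
  PySem.List.pySetD xs i (PySem.List.pyGetD xs i 0 + v)

def mute_near_kick_alt (mask : List Int) (kick_mask : List Int) (window : Int) : List Int :=
  let steps : Int := (mask.length : Int)
  if window < 0 then mask
  else
    let kicks : List Int :=
      (PySem.List.enumerate kick_mask 0).foldl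
        (fun acc p => if p.2 ≠ 0 then acc ++ [PySem.Int.mod p.1 steps] else acc) []
    if kicks = [] then mask
    else
      let width : Int := 2 * window + 1
      if width ≥ steps then List.replicate mask.length 0
      else
        let diff : List Int := kicks.foldl
          (fun d k =>
            let s := PySem.Int.mod (k - window) steps
            let e := s + width
            if e ≤ steps then pyIncr (pyIncr d s 1) e (-1)
            else pyIncr (pyIncr (pyIncr d s 1) 0 1) (e - steps) (-1))
          (List.replicate (mask.length + 1) 0)
        ((PySem.List.enumerate mask 0).foldl
          (fun st p =>
            let acc := st.2 + PySem.List.pyGetD diff p.1 0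
            (st.1 ++ [if acc = 0 then p.2 else 0], acc))
          (([] : List Int), (0 : Int))).1

-- ===== PRECONDITION & SPEC =====
-- Pre_ excludes exactly the inputs where Python A raises ZeroDivisionError
-- (empty mask with a truthy kick and window ≥ 0); B raises there too.
def Pre_mute_near_kick (mask : List Int) (kick_mask : List Int) (window : Int) : Prop :=
  ¬ (mask = [] ∧ 0 ≤ window ∧ ∃ v ∈ kick_mask, v ≠ 0)
instance (mask : List Int) (kick_mask : List Int) (window : Int) : Decidable (Pre_mute_near_kick mask kick_mask window) := by unfold Pre_mute_near_kick; infer_instance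

def pvWitness_mute_near_kick : List Int × List Int × Int := ([1, 1, 0, 1, 1, 1, 0, 1], [1, 0, 0, 0, 1, 0, 0, 0], 1)

def Spec_mute_near_kick (mask : List Int) (kick_mask : List Int) (window : Int) (out : List Int) : Prop := out = mute_near_kick_alt mask kick_mask window
instance (mask : List Int) (kick_mask : List Int) (window : Int) (out : List Int) : Decidable (Spec_mute_near_kick mask kick_mask window out) := by unfold Spec_mute_near_kick; infer_instance

-- ===== CLAIM (what is proved, stated in full; the proofs are below) =====
def Claim_equal_mute_near_kick : Prop := ∀ (mask : List Int) (kick_mask : List Int) (window : Int), Dom_mute_near_kick mask kick_mask window → Pre_mute_near_kick mask kick_mask window → Spec_mute_near_kick mask kick_mask window (mute_near_kick mask kick_mask window)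

-- ===== LEMMAS AND PROOFS =====

-- kick-index list extraction commutes with mapping the index
theorem pv_kickfold_map (f : Int → Int) :
    ∀ (l : List (Int × Int)) (acc : List Int),
      l.foldl (fun acc p => if p.2 ≠ 0 then acc ++ [f p.1] else acc) (acc.map f)
        = (l.foldl (fun acc p => if p.2 ≠ 0 then acc ++ [p.1] else acc) acc).map f := by
  intro l
  induction l with
  | nil => intro acc; simp
  | cons p l ih =>
    intro acc
    by_cases h : p.2 ≠ 0
    · simp only [List.foldl_cons, if_pos h]
      have h2 : acc.map f ++ [f p.1] = (acc ++ [p.1]).map f := by simp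
      rw [h2, ih]
    · simp only [List.foldl_cons, if_neg h]
      exact ih acc

-- if the kick-index list is nonempty, some kick entry is truthy
theorem pv_kickfold_ne (km : List Int) :
    (∀ v ∈ km, v = 0) →
    ∀ (l : List (Int × Int)), (∀ p ∈ l, p.2 ∈ km) →
      ∀ acc, l.foldl (fun acc p => if p.2 ≠ 0 then acc ++ [p.1] else acc) acc = acc := by
  intro hkm l
  induction l with
  | nil => intro _ acc; simp
  | cons p l ih =>
    intro hl acc
    have hp : p.2 = 0 := hkm _ (hl p (by simp))
    simp only [List.foldl_cons, hp, ne_eq, not_true_eq_false, if_neg, not_false_eq_true,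
      if_false]
    exact ih (fun q hq => hl q (by simp [hq])) acc

-- membership in the nested add-fold building to_zero
theorem pv_mem_add_fold (R : List Int) (h : Int → Int) :
    ∀ (s0 : List Int) (x : Int),
      x ∈ R.foldl (fun s d => PySem.Set.add s (h d)) s0 ↔ x ∈ s0 ∨ ∃ d ∈ R, h d = x := by
  induction R with
  | nil => intro s0 x; simp
  | cons r R ih =>
    intro s0 x
    rw [List.foldl_cons, ih]
    simp only [PySem.Set.mem_add, List.mem_cons]
    constructor
    · rintro ((hx | hx) | ⟨d, hd, hdx⟩)
      · exact Or.inl hx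
      · exact Or.inr ⟨r, Or.inl rfl, hx.symm⟩
      · exact Or.inr ⟨d, Or.inr hd, hdx⟩
    · rintro (hx | ⟨d, (rfl | hd), hdx⟩)
      · exact Or.inl (Or.inl hx)
      · exact Or.inl (Or.inr hdx.symm)
      · exact Or.inr ⟨d, hd, hdx⟩

theorem pv_mem_add_fold2 (K R : List Int) (g : Int → Int → Int) :
    ∀ (s0 : List Int) (x : Int),
      x ∈ K.foldl (fun s k => R.foldl (fun s d => PySem.Set.add s (g k d)) s) s0 ↔
        x ∈ s0 ∨ ∃ k ∈ K, ∃ d ∈ R, g k d = x := by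
  induction K with
  | nil => intro s0 x; simp
  | cons a K ih =>
    intro s0 x
    rw [List.foldl_cons, ih, pv_mem_add_fold]
    constructor
    · rintro ((hx | ⟨d, hd, hdx⟩) | ⟨k, hk, hkd⟩)
      · exact Or.inl hx
      · exact Or.inr ⟨a, by simp, d, hd, hdx⟩
      · exact Or.inr ⟨k, by simp [hk], hkd⟩
    · rintro (hx | ⟨k, hk, d, hd, hdx⟩)
      · exact Or.inl (Or.inl hx)
      · rcases List.mem_cons.mp hk with rfl | hk
        · exact Or.inl (Or.inr ⟨d, hd, hdx⟩)
        · exact Or.inr ⟨k, hk, d, hd, hdx⟩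

-- zeroing fold characterisation (A's final loop)
theorem pv_setzero_fold :
    ∀ (L : List Int) (xs : List Int),
      (∀ e ∈ L, 0 ≤ e ∧ e < (xs.length : Int)) →
      (L.foldl (fun o i => PySem.List.pySetD o i 0) xs).length = xs.length ∧
      ∀ (dflt : Int) (j : Nat),
        (L.foldl (fun o i => PySem.List.pySetD o i 0) xs).getD j dflt
          = if (j : Int) ∈ L then 0 else xs.getD j dflt := by
  intro L
  induction L with
  | nil => intro xs _; exact ⟨rfl, fun d j => by simp⟩
  | cons e L ih =>
    intro xs hb
    have he : 0 ≤ e ∧ e < (xs.length : Int) := hb e (by simp)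
    have hset : PySem.List.pySetD xs e (0 : Int) = xs.set e.toNat 0 :=
      PySem.List.pySetD_of_nonneg xs 0 he.1
    have hlen : (PySem.List.pySetD xs e (0 : Int)).length = xs.length := by
      rw [hset]; exact xs.length_set
    have hb' : ∀ x ∈ L, 0 ≤ x ∧ x < ((PySem.List.pySetD xs e (0 : Int)).length : Int) := by
      intro x hx; rw [hlen]; exact hb x (by simp [hx])
    obtain ⟨ihlen, ihget⟩ := ih (PySem.List.pySetD xs e (0 : Int)) hb'
    refine ⟨by simpa [hlen] using ihlen, ?_⟩
    intro d j
    rw [List.foldl_cons, ihget]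
    have hget : (PySem.List.pySetD xs e (0 : Int)).getD j d
        = if (j : Int) = e then 0 else xs.getD j d := by
      rw [hset, List.getD_eq_getElem?_getD, List.getD_eq_getElem?_getD, List.getElem?_set]
      by_cases hje : (j : Int) = e
      · have hjn : e.toNat = j := by omega
        rw [if_pos hjn, if_pos hje]
        have h2 : e.toNat < xs.length := by omega
        simp [h2]
      · have hjn : ¬ e.toNat = j := by omega
        rw [if_neg hjn, if_neg hje]
    by_cases hjL : (j : Int) ∈ L
    · have hm : (j : Int) ∈ (e :: L : List Int) := by simp [hjL]
      rw [if_pos hjL, if_pos hm]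
    · rw [if_neg hjL, hget]
      by_cases hje : (j : Int) = e
      · have hm : (j : Int) ∈ (e :: L : List Int) := by simp [hje]
        rw [if_pos hje, if_pos hm]
      · have hm : ¬ (j : Int) ∈ (e :: L : List Int) := by simp [hje, hjL]
        rw [if_neg hje, if_neg hm]

-- prefix sums of the diff array
def pvSS (diff : List Int) (t : Nat) : Int :=
  ((List.range (t + 1)).map (fun (p : Nat) => PySem.List.pyGetD diff (p : Int) 0)).sum

theorem pv_getD_incr (dl : List Int) (i v : Int) (hi : 0 ≤ i) (hi2 : i < (dl.length : Int)) (p : Nat) :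
    PySem.List.pyGetD (pyIncr dl i v) (p : Int) 0
      = PySem.List.pyGetD dl (p : Int) 0 + (if (p : Int) = i then v else 0) := by
  have hset : pyIncr dl i v = dl.set i.toNat (PySem.List.pyGetD dl i 0 + v) := by
    unfold pyIncr; exact PySem.List.pySetD_of_nonneg dl _ hi
  have hval : PySem.List.pyGetD dl i 0 = dl.getD i.toNat 0 := by
    rw [PySem.List.pyGetD_eq_getElem dl 0 hi hi2, List.getD_eq_getElem?_getD]
    have : i.toNat < dl.length := by omega
    simp [List.getElem?_eq_getElem this]
  rw [hset, PySem.List.pyGetD_natCast, PySem.List.pyGetD_natCast,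
    List.getD_eq_getElem?_getD, List.getD_eq_getElem?_getD, List.getElem?_set]
  by_cases hpi : (p : Int) = i
  · have hpn : i.toNat = p := by omega
    have hlt : p < dl.length := by omega
    have hlt' : i.toNat < dl.length := by omega
    rw [if_pos hpn, if_pos hpi, if_pos hlt']
    simp [hval, hpn, List.getD_eq_getElem?_getD, List.getElem?_eq_getElem hlt]
  · have hpn : ¬ i.toNat = p := by omega
    rw [if_neg hpn, if_neg hpi]
    simp

theorem pv_len_incr (dl : List Int) (i v : Int) : (pyIncr dl i v).length = dl.length := by
  unfold pyIncr; exact PySem.List.length_pySetD ..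

theorem pv_SS_incr (dl : List Int) (i v : Int) (hi : 0 ≤ i) (hi2 : i < (dl.length : Int)) (t : Nat) :
    pvSS (pyIncr dl i v) t = pvSS dl t + (if i ≤ (t : Int) then v else 0) := by
  induction t with
  | zero =>
    simp only [pvSS, Nat.zero_add, List.range_one, List.map_cons, List.map_nil, List.sum_cons,
      List.sum_nil]
    rw [pv_getD_incr dl i v hi hi2 0]
    push_cast
    split_ifs <;> omega
  | succ t ih =>
    have hstep : ∀ f : List Int, pvSS f (t + 1)
        = pvSS f t + PySem.List.pyGetD f ((t + 1 : Nat) : Int) 0 := by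
      intro f
      have hr : List.range (t + 1 + 1) = List.range (t + 1) ++ [t + 1] := List.range_succ
      simp only [pvSS, hr, List.map_append, List.sum_append, List.map_cons, List.map_nil,
        List.sum_cons, List.sum_nil]
      ring
    rw [hstep, hstep, ih, pv_getD_incr dl i v hi hi2 (t + 1)]
    push_cast
    split_ifs <;> omega

theorem pv_SS_replicate (r : Nat) (t : Nat) : pvSS (List.replicate r (0 : Int)) t = 0 := by
  have hp : ∀ p : Nat, PySem.List.pyGetD (List.replicate r (0 : Int)) (p : Int) 0 = 0 := by
    intro p
    rw [PySem.List.pyGetD_natCast, List.getD_eq_getElem?_getD, List.getElem?_replicate]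
    split <;> simp
  simp [pvSS, hp]

-- per-kick contribution to the prefix sum at position t
def pvContrib (m w : Int) (k : Int) (t : Nat) : Int :=
  let s := (k - w) % m
  let e := s + (2 * w + 1)
  if e ≤ m then (if s ≤ (t : Int) then 1 else 0) + (if e ≤ (t : Int) then -1 else 0)
  else (if s ≤ (t : Int) then 1 else 0) + 1 + (if e - m ≤ (t : Int) then -1 else 0)

theorem pv_SS_diff_fold (m w : Int) (hm : 0 < m) (hw : 0 ≤ w) (hnarrow : 2 * w + 1 < m) (t : Nat) :
    ∀ (K : List Int) (dl : List Int), dl.length = m.toNat + 1 →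
      (K.foldl
        (fun d k =>
          let s := PySem.Int.mod (k - w) m
          let e := s + (2 * w + 1)
          if e ≤ m then pyIncr (pyIncr d s 1) e (-1)
          else pyIncr (pyIncr (pyIncr d s 1) 0 1) (e - m) (-1)) dl).length = dl.length ∧
      pvSS
        (K.foldl
          (fun d k =>
            let s := PySem.Int.mod (k - w) m
            let e := s + (2 * w + 1)
            if e ≤ m then pyIncr (pyIncr d s 1) e (-1)
            else pyIncr (pyIncr (pyIncr d s 1) 0 1) (e - m) (-1)) dl) t
        = pvSS dl t + (K.map (fun k => pvContrib m w k t)).sum := by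
  intro K
  induction K with
  | nil => intro dl hdl; exact ⟨rfl, by simp⟩
  | cons k K ih =>
    intro dl hdl
    set s : Int := PySem.Int.mod (k - w) m with hs
    have hsem : s = (k - w) % m := PySem.Int.mod_eq_emod_of_pos hm
    have hs0 : 0 ≤ s := by rw [hsem]; exact Int.emod_nonneg _ (by omega)
    have hs1 : s < m := by rw [hsem]; exact Int.emod_lt_of_pos _ hm
    have hlen : (m : Int) + 1 = (dl.length : Int) := by rw [hdl]; push_cast; omega
    -- the one-kick update
    by_cases hcase : s + (2 * w + 1) ≤ m
    · have hstep : (fun d k =>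
          let s := PySem.Int.mod (k - w) m
          let e := s + (2 * w + 1)
          if e ≤ m then pyIncr (pyIncr d s 1) e (-1)
          else pyIncr (pyIncr (pyIncr d s 1) 0 1) (e - m) (-1)) dl k
          = pyIncr (pyIncr dl s 1) (s + (2 * w + 1)) (-1) := by
        simp only [← hs, if_pos hcase]
      have hlen1 : (pyIncr (pyIncr dl s 1) (s + (2 * w + 1)) (-1)).length = dl.length := by
        rw [pv_len_incr, pv_len_incr]
      have hSS : pvSS (pyIncr (pyIncr dl s 1) (s + (2 * w + 1)) (-1)) t
          = pvSS dl t + pvContrib m w k t := by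
        rw [pv_SS_incr _ _ _ (by omega) (by rw [pv_len_incr]; omega),
          pv_SS_incr _ _ _ hs0 (by omega)]
        simp only [pvContrib, ← hsem, ← hs, if_pos hcase]
        ring
      obtain ⟨l1, l2⟩ := ih ((fun d k =>
          let s := PySem.Int.mod (k - w) m
          let e := s + (2 * w + 1)
          if e ≤ m then pyIncr (pyIncr d s 1) e (-1)
          else pyIncr (pyIncr (pyIncr d s 1) 0 1) (e - m) (-1)) dl k)
        (by rw [hstep, hlen1, hdl])
      rw [List.foldl_cons] at *
      refine ⟨by rw [l1, hstep, hlen1], ?_⟩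
      rw [l2, hstep, hSS, List.map_cons, List.sum_cons]
      ring
    · have hem : m < s + (2 * w + 1) := by omega
      have hstep : (fun d k =>
          let s := PySem.Int.mod (k - w) m
          let e := s + (2 * w + 1)
          if e ≤ m then pyIncr (pyIncr d s 1) e (-1)
          else pyIncr (pyIncr (pyIncr d s 1) 0 1) (e - m) (-1)) dl k
          = pyIncr (pyIncr (pyIncr dl s 1) 0 1) (s + (2 * w + 1) - m) (-1) := by
        simp only [← hs, if_neg hcase]
      have hlen1 : (pyIncr (pyIncr (pyIncr dl s 1) 0 1) (s + (2 * w + 1) - m) (-1)).length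
          = dl.length := by rw [pv_len_incr, pv_len_incr, pv_len_incr]
      have hSS : pvSS (pyIncr (pyIncr (pyIncr dl s 1) 0 1) (s + (2 * w + 1) - m) (-1)) t
          = pvSS dl t + pvContrib m w k t := by
        rw [pv_SS_incr _ _ _ (by omega) (by rw [pv_len_incr, pv_len_incr]; omega),
          pv_SS_incr _ _ _ (by omega) (by rw [pv_len_incr]; omega),
          pv_SS_incr _ _ _ hs0 (by omega)]
        have h0t : ((0 : Int) ≤ (t : Int)) := by omega
        simp only [pvContrib, ← hsem, ← hs, if_neg hcase, if_pos h0t]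
        ring
      obtain ⟨l1, l2⟩ := ih ((fun d k =>
          let s := PySem.Int.mod (k - w) m
          let e := s + (2 * w + 1)
          if e ≤ m then pyIncr (pyIncr d s 1) e (-1)
          else pyIncr (pyIncr (pyIncr d s 1) 0 1) (e - m) (-1)) dl k)
        (by rw [hstep, hlen1, hdl])
      rw [List.foldl_cons] at *
      refine ⟨by rw [l1, hstep, hlen1], ?_⟩
      rw [l2, hstep, hSS, List.map_cons, List.sum_cons]
      ring

-- the core circular-interval characterisation
theorem pv_core (m w j k : Int) (hm : 0 < m) (hw : 0 ≤ w) (hnarrow : 2 * w + 1 < m)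
    (hj : 0 ≤ j) (hj2 : j < m) :
    (∃ dd, -w ≤ dd ∧ dd ≤ w ∧ (k + dd) % m = j) ↔
      (((k - w) % m ≤ j ∧ j < (k - w) % m + (2 * w + 1)) ∨
        (m < (k - w) % m + (2 * w + 1) ∧ j + m < (k - w) % m + (2 * w + 1))) := by
  set s : Int := (k - w) % m with hs
  have hs0 : 0 ≤ s := Int.emod_nonneg _ (by omega)
  have hs1 : s < m := Int.emod_lt_of_pos _ hm
  have hq : k - w - s = m * ((k - w) / m) := by
    rw [hs, Int.emod_def]; ring
  constructor
  · rintro ⟨d, h1, h2, h3⟩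
    have e1 : (j - s) % m = (d + w) % m := by
      conv_lhs => rw [← h3]
      rw [hs, Int.sub_emod, Int.emod_emod_of_dvd _ dvd_rfl, Int.emod_emod_of_dvd _ dvd_rfl,
        ← Int.sub_emod]
      congr 1
      ring
    have e2 : (d + w) % m = d + w := Int.emod_eq_of_lt (by omega) (by omega)
    by_cases hjs : s ≤ j
    · have e3 : (j - s) % m = j - s := Int.emod_eq_of_lt (by omega) (by omega)
      left; omega
    · have e3 : (j - s) % m = j - s + m := by
        have : (j - s + m) % m = j - s + m := Int.emod_eq_of_lt (by omega) (by omega)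
        rw [← Int.add_emod_right, this]
      right; omega
  · rintro (⟨h1, h2⟩ | ⟨h1, h2⟩)
    · refine ⟨j - s - w, by omega, by omega, ?_⟩
      have h4 : k + (j - s - w) = j + m * ((k - w) / m) := by linear_combination hq
      rw [h4, Int.add_mul_emod_self_left, Int.emod_eq_of_lt hj hj2]
    · refine ⟨j + m - s - w, by omega, by omega, ?_⟩
      have h4 : k + (j + m - s - w) = j + m * ((k - w) / m + 1) := by linear_combination hq
      rw [h4, Int.add_mul_emod_self_left, Int.emod_eq_of_lt hj hj2]

theorem pv_core_wide (m w j k : Int) (hm : 0 < m) (hw : 0 ≤ w) (hwide : m ≤ 2 * w + 1)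
    (hj : 0 ≤ j) (hj2 : j < m) :
    ∃ dd, -w ≤ dd ∧ dd ≤ w ∧ (k + dd) % m = j := by
  set d0 : Int := (j - k) % m with hd0
  have h0 : 0 ≤ d0 := Int.emod_nonneg _ (by omega)
  have h1 : d0 < m := Int.emod_lt_of_pos _ hm
  have hbase : (k + d0) % m = j := by
    rw [hd0, add_comm, Int.emod_add_emod]
    have : j - k + k = j := by ring
    rw [this, Int.emod_eq_of_lt hj hj2]
  by_cases hc : d0 ≤ w
  · exact ⟨d0, by omega, hc, hbase⟩
  · refine ⟨d0 - m, by omega, by omega, ?_⟩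
    have h4 : k + (d0 - m) = (k + d0) + m * (-1) := by ring
    rw [h4, Int.add_mul_emod_self_left, hbase]

theorem pv_contrib_char (m w k : Int) (hm : 0 < m) (hw : 0 ≤ w) (hnarrow : 2 * w + 1 < m)
    (t : Nat) (ht : (t : Int) < m) :
    pvContrib m w (k % m) t
      = if ((k - w) % m ≤ (t : Int) ∧ (t : Int) < (k - w) % m + (2 * w + 1)) ∨
           (m < (k - w) % m + (2 * w + 1) ∧ (t : Int) + m < (k - w) % m + (2 * w + 1))
        then 1 else 0 := by
  have hcong : (k % m - w) % m = (k - w) % m := by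
    rw [Int.sub_emod, Int.emod_emod_of_dvd _ dvd_rfl, ← Int.sub_emod]
  set s : Int := (k - w) % m with hs
  have hs0 : 0 ≤ s := Int.emod_nonneg _ (by omega)
  have hs1 : s < m := Int.emod_lt_of_pos _ hm
  simp only [pvContrib, hcong, ← hs]
  split_ifs <;> omega

-- B's output loop
theorem pv_out_fold (diff : List Int) :
    ∀ (ms : List Int) (s0 : Nat) (out0 : List Int) (acc0 : Int),
      ((PySem.List.enumerate ms (s0 : Int)).foldl
        (fun st p =>
          let acc := st.2 + PySem.List.pyGetD diff p.1 0
          (st.1 ++ [if acc = 0 then p.2 else 0], acc)) (out0, acc0)).1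
      = out0 ++ ms.mapIdx (fun t x =>
          if acc0 + ((List.range (t + 1)).map (fun (p : Nat) => PySem.List.pyGetD diff ((s0 : Int) + (p : Int)) 0)).sum = 0
          then x else 0) := by
  intro ms
  induction ms with
  | nil => intro s0 out0 acc0; simp [PySem.List.enumerate_nil]
  | cons x ms ih =>
    intro s0 out0 acc0
    rw [PySem.List.enumerate_cons, List.foldl_cons]
    have hcast : ((s0 : Int) + 1) = ((s0 + 1 : Nat) : Int) := by push_cast; ring
    rw [hcast, ih]
    rw [List.mapIdx_cons]
    have hhead : (if acc0 + ((List.range (0 + 1)).map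
          (fun (p : Nat) => PySem.List.pyGetD diff ((s0 : Int) + (p : Int)) 0)).sum = 0
        then x else 0)
        = (if acc0 + PySem.List.pyGetD diff (s0 : Int) 0 = 0 then x else 0) := by
      simp
    have htail : ∀ (t : Nat) (y : Int),
        (if (acc0 + PySem.List.pyGetD diff (s0 : Int) 0) + ((List.range (t + 1)).map
            (fun (p : Nat) => PySem.List.pyGetD diff (((s0 + 1 : Nat) : Int) + (p : Int)) 0)).sum = 0
          then y else 0)
        = (if acc0 + ((List.range (t + 1 + 1)).map
            (fun (p : Nat) => PySem.List.pyGetD diff ((s0 : Int) + (p : Int)) 0)).sum = 0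
          then y else 0) := by
      intro t y
      have hsum : ((List.range (t + 1 + 1)).map
            (fun (p : Nat) => PySem.List.pyGetD diff ((s0 : Int) + (p : Int)) 0)).sum
          = PySem.List.pyGetD diff (s0 : Int) 0 + ((List.range (t + 1)).map
            (fun (p : Nat) => PySem.List.pyGetD diff (((s0 + 1 : Nat) : Int) + (p : Int)) 0)).sum := by
        rw [List.range_succ_eq_map, List.map_cons, List.sum_cons, List.map_map]
        have : ((s0 : Int) + ((0 : Nat) : Int)) = (s0 : Int) := by push_cast; ring
        rw [this]
        have hmap := List.map_congr_left (l := List.range (t + 1))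
          (f := (fun (p : Nat) => PySem.List.pyGetD diff ((s0 : Int) + (p : Int)) 0) ∘ Nat.succ)
          (g := fun (p : Nat) => PySem.List.pyGetD diff (((s0 + 1 : Nat) : Int) + (p : Int)) 0)
          (by intro a ha
              simp only [Function.comp]
              congr 1
              push_cast
              ring)
        rw [hmap]
      rw [hsum]
      congr 1
      · simp only [eq_iff_iff]; constructor <;> intro h <;> omega
    rw [List.append_assoc]
    congr 1
    rw [List.singleton_append]
    congr 1
    · exact hhead.symm
    · congr 1
      funext t y
      exact htail t y

-- proof-side abbreviations for the two ports' intermediate values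
def pvKA (km : List Int) : List Int :=
  (PySem.List.enumerate km 0).foldl (fun acc p => if p.2 ≠ 0 then acc ++ [p.1] else acc) []

def pvKB (km : List Int) (m : Int) : List Int :=
  (PySem.List.enumerate km 0).foldl
    (fun acc p => if p.2 ≠ 0 then acc ++ [PySem.Int.mod p.1 m] else acc) []

def pvTZ (km : List Int) (w m : Int) : List Int :=
  (pvKA km).foldl
    (fun s k =>
      (PySem.List.pyRange (-w) (w + 1) 1).foldl
        (fun s d => PySem.Set.add s (PySem.Int.mod (k + d) m)) s)
    PySem.Set.empty

theorem pv_hA (mask km : List Int) (w : Int) :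
    mute_near_kick mask km w
      = (pvTZ km w (mask.length : Int)).foldl (fun o i => PySem.List.pySetD o i 0) mask := rfl

theorem pv_hB (mask km : List Int) (w : Int) :
    mute_near_kick_alt mask km w
      = if w < 0 then mask
        else if pvKB km (mask.length : Int) = [] then mask
        else if 2 * w + 1 ≥ (mask.length : Int) then List.replicate mask.length 0
        else
          ((PySem.List.enumerate mask 0).foldl
            (fun st p =>
              let acc := st.2 + PySem.List.pyGetD
                ((pvKB km (mask.length : Int)).foldl
                  (fun d k =>
                    let s := PySem.Int.mod (k - w) (mask.length : Int)
                    let e := s + (2 * w + 1)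
                    if e ≤ (mask.length : Int) then pyIncr (pyIncr d s 1) e (-1)
                    else pyIncr (pyIncr (pyIncr d s 1) 0 1) (e - (mask.length : Int)) (-1))
                  (List.replicate (mask.length + 1) 0)) p.1 0
              (st.1 ++ [if acc = 0 then p.2 else 0], acc))
            (([] : List Int), (0 : Int))).1 := rfl

theorem pv_KB_map (km : List Int) (m : Int) :
    pvKB km m = (pvKA km).map (fun k => PySem.Int.mod k m) := by
  unfold pvKB pvKA
  have := pv_kickfold_map (fun k => PySem.Int.mod k m) (PySem.List.enumerate km 0) []
  simpa using this

theorem pv_KA_nil (km : List Int) (hkm : ∀ v ∈ km, v = 0) : pvKA km = [] := by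
  unfold pvKA
  refine pv_kickfold_ne km hkm (PySem.List.enumerate km 0) ?_ []
  intro p hp
  rcases (PySem.List.mem_enumerate_iff km 0 p).mp hp with ⟨k, hk, rfl⟩
  exact List.getElem_mem hk

theorem pv_mem_TZ (km : List Int) (w m : Int) (x : Int) :
    x ∈ pvTZ km w m ↔
      ∃ k ∈ pvKA km, ∃ d ∈ PySem.List.pyRange (-w) (w + 1) 1, PySem.Int.mod (k + d) m = x := by
  unfold pvTZ
  rw [pv_mem_add_fold2]
  simp [PySem.Set.empty]

theorem pv_main (mask km : List Int) (w : Int) (hP : Pre_mute_near_kick mask km w) :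
    mute_near_kick mask km w = mute_near_kick_alt mask km w := by
  rw [pv_hA, pv_hB]
  by_cases hw : w < 0
  · -- window < 0 : empty range, nothing muted
    rw [if_pos hw]
    have hrange : PySem.List.pyRange (-w) (w + 1) 1 = [] :=
      PySem.List.pyRange_one_eq_nil (by omega)
    have htz : pvTZ km w (mask.length : Int) = [] := by
      unfold pvTZ
      rw [hrange]
      simp only [List.foldl_nil]
      rw [PySem.List.foldl_ignore]
      rfl
    rw [htz, List.foldl_nil]
  · rw [if_neg hw]
    have hw' : 0 ≤ w := by omega
    set m : Int := (mask.length : Int) with hm_def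
    by_cases hKA : pvKA km = []
    · -- no kicks
      have hKB : pvKB km m = [] := by rw [pv_KB_map, hKA]; rfl
      rw [if_pos hKB]
      have htz : pvTZ km w m = [] := by unfold pvTZ; rw [hKA]; rfl
      rw [htz, List.foldl_nil]
    · -- some kick: mask nonempty by Pre_
      have hKB : pvKB km m ≠ [] := by
        rw [pv_KB_map]; simpa using hKA
      rw [if_neg hKB]
      have hkmne : ∃ v ∈ km, v ≠ 0 := by
        by_contra hcon
        push_neg at hcon
        exact hKA (pv_KA_nil km hcon)
      have hmaskne : mask ≠ [] := by
        intro hnil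
        exact hP ⟨hnil, hw', hkmne⟩
      have hn : 0 < mask.length := List.length_pos_iff.mpr hmaskne
      have hm : 0 < m := by rw [hm_def]; exact_mod_cast hn
      -- A-side characterisation
      have hbound : ∀ e ∈ pvTZ km w m, 0 ≤ e ∧ e < (mask.length : Int) := by
        intro e he
        rcases (pv_mem_TZ km w m e).mp he with ⟨k, _, d, _, rfl⟩
        rw [PySem.Int.mod_eq_emod_of_pos hm, ← hm_def]
        exact ⟨Int.emod_nonneg _ (by omega), Int.emod_lt_of_pos _ hm⟩
      obtain ⟨hAlen, hAget⟩ := pv_setzero_fold (pvTZ km w m) mask hbound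
      by_cases hwide : 2 * w + 1 ≥ m
      · -- everything gets muted
        rw [if_pos hwide]
        obtain ⟨k0, hk0⟩ := List.exists_mem_of_ne_nil _ hKA
        apply List.ext_getElem (by rw [hAlen, List.length_replicate])
        intro j hj hj2
        rw [List.getElem_replicate]
        have hjn : j < mask.length := by rwa [hAlen] at hj
        obtain ⟨dd, hd1, hd2, hd3⟩ :=
          pv_core_wide m w (j : Int) k0 hm hw' (by omega) (by omega)
            (by rw [hm_def]; exact_mod_cast hjn)
        have hmemj : ((j : Int)) ∈ pvTZ km w m := by
          rw [pv_mem_TZ]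
          exact ⟨k0, hk0, dd, PySem.List.mem_pyRange_one.mpr ⟨by omega, by omega⟩,
            by rw [PySem.Int.mod_eq_emod_of_pos hm, hd3]⟩
        have := hAget 0 j
        rw [if_pos hmemj] at this
        rw [← List.getD_eq_getElem _ 0 hj, this]
      · -- main branch: diff array
        rw [if_neg hwide]
        have hnarrow : 2 * w + 1 < m := by omega
        have hPair := fun t => pv_SS_diff_fold m w hm hw' hnarrow t (pvKB km m)
          (List.replicate (mask.length + 1) 0)
          (by rw [List.length_replicate, hm_def]; omega)
        have hSS := fun t => (hPair t).2
        -- rewrite B's output loop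
        have henum : PySem.List.enumerate mask (0 : Int)
            = PySem.List.enumerate mask ((0 : Nat) : Int) := by norm_num
        rw [henum, pv_out_fold, List.nil_append]
        apply List.ext_getElem (by rw [hAlen, List.length_mapIdx])
        intro j hj hj2
        have hjn : j < mask.length := by rwa [hAlen] at hj
        rw [List.getElem_mapIdx]
        have hseg : ((List.range (j + 1)).map
            (fun (p : Nat) => PySem.List.pyGetD
              ((pvKB km m).foldl
                (fun d k =>
                  let s := PySem.Int.mod (k - w) m
                  let e := s + (2 * w + 1)
                  if e ≤ m then pyIncr (pyIncr d s 1) e (-1)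
                  else pyIncr (pyIncr (pyIncr d s 1) 0 1) (e - m) (-1))
                (List.replicate (mask.length + 1) 0))
              (((0 : Nat) : Int) + (p : Int)) 0)).sum
            = pvSS ((pvKB km m).foldl
                (fun d k =>
                  let s := PySem.Int.mod (k - w) m
                  let e := s + (2 * w + 1)
                  if e ≤ m then pyIncr (pyIncr d s 1) e (-1)
                  else pyIncr (pyIncr (pyIncr d s 1) 0 1) (e - m) (-1))
                (List.replicate (mask.length + 1) 0)) j := by
          unfold pvSS
          refine congrArg (List.sum (α := Int)) (List.map_congr_left ?_)
          intro a _
          norm_num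
        have hsum2 : pvSS ((pvKB km m).foldl
              (fun d k =>
                let s := PySem.Int.mod (k - w) m
                let e := s + (2 * w + 1)
                if e ≤ m then pyIncr (pyIncr d s 1) e (-1)
                else pyIncr (pyIncr (pyIncr d s 1) 0 1) (e - m) (-1))
              (List.replicate (mask.length + 1) 0)) j
            = ((pvKA km).map
                ((fun k => pvContrib m w k j) ∘ fun k => PySem.Int.mod k m)).sum := by
          rw [hSS j, pv_SS_replicate, pv_KB_map, List.map_map]
          ring
        rw [hseg, hsum2]
        have hterm : ∀ k : Int,
            ((fun k => pvContrib m w k j) ∘ fun k => PySem.Int.mod k m) k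
              = if ((k - w) % m ≤ (j : Int) ∧ (j : Int) < (k - w) % m + (2 * w + 1)) ∨
                   (m < (k - w) % m + (2 * w + 1) ∧ (j : Int) + m < (k - w) % m + (2 * w + 1))
                then 1 else 0 := by
          intro k
          simp only [Function.comp]
          rw [PySem.Int.mod_eq_emod_of_pos hm]
          exact pv_contrib_char m w k hm hw' hnarrow j (by rw [hm_def]; exact_mod_cast hjn)
        have hcov : ∀ k : Int,
            (((k - w) % m ≤ (j : Int) ∧ (j : Int) < (k - w) % m + (2 * w + 1)) ∨
              (m < (k - w) % m + (2 * w + 1) ∧ (j : Int) + m < (k - w) % m + (2 * w + 1))) ↔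
            ∃ d ∈ PySem.List.pyRange (-w) (w + 1) 1, PySem.Int.mod (k + d) m = (j : Int) := by
          intro k
          rw [← pv_core m w (j : Int) k hm hw' hnarrow (by omega)
            (by rw [hm_def]; exact_mod_cast hjn)]
          constructor
          · rintro ⟨dd, h1, h2, h3⟩
            exact ⟨dd, PySem.List.mem_pyRange_one.mpr ⟨by omega, by omega⟩,
              by rw [PySem.Int.mod_eq_emod_of_pos hm, h3]⟩
          · rintro ⟨dd, hdm, h3⟩
            obtain ⟨hd1, hd2⟩ := PySem.List.mem_pyRange_one.mp hdm
            rw [PySem.Int.mod_eq_emod_of_pos hm] at h3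
            exact ⟨dd, by omega, by omega, h3⟩
        have hA := hAget 0 j
        rw [← List.getD_eq_getElem _ 0 hj, hA]
        rw [← List.getD_eq_getElem _ 0 (by omega : j < mask.length)]
        by_cases hmem : ((j : Int)) ∈ pvTZ km w m
        · rw [if_pos hmem]
          rcases (pv_mem_TZ km w m _).mp hmem with ⟨k, hk, hex⟩
          have hpos : 0 < ((pvKA km).map
              ((fun k => pvContrib m w k j) ∘ fun k => PySem.Int.mod k m)).sum := by
            have hnn : ∀ x ∈ (pvKA km).map
                ((fun k => pvContrib m w k j) ∘ fun k => PySem.Int.mod k m), 0 ≤ x := by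
              intro x hx
              rcases List.mem_map.mp hx with ⟨k', _, rfl⟩
              rw [hterm k']
              split_ifs <;> omega
            have h1 : (1 : Int) ∈ (pvKA km).map
                ((fun k => pvContrib m w k j) ∘ fun k => PySem.Int.mod k m) := by
              refine List.mem_map.mpr ⟨k, hk, ?_⟩
              rw [hterm k, if_pos ((hcov k).mpr hex)]
            have := List.single_le_sum hnn 1 h1
            omega
          rw [if_neg (by omega)]
        · rw [if_neg hmem]
          have hzs : ((pvKA km).map
              ((fun k => pvContrib m w k j) ∘ fun k => PySem.Int.mod k m)).sum = 0 := by
            apply List.sum_eq_zero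
            intro x hx
            rcases List.mem_map.mp hx with ⟨k', hk', rfl⟩
            rw [hterm k', if_neg]
            intro hc
            exact hmem ((pv_mem_TZ km w m _).mpr ⟨k', hk', (hcov k').mp hc⟩)
          rw [hzs, if_pos (by ring)]

-- ===== VERDICT (by name: the statement is the Claim_ definition above) =====
theorem mute_near_kick_spec : Claim_equal_mute_near_kick := by
  intro mask km w _ hP
  show mute_near_kick mask km w = mute_near_kick_alt mask km w
  exact pv_main mask km w hP
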